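-- pv_equiv track=rewrite | github.com/jhillierdavis/advent-of-code-solutions | aoc-2023/aoc-2023-day-01/solution-in-python3/solution.py | extract_all_numbers_from_string
-- ===== SOURCE A (Python) =====
-- def extract_all_numbers_from_string(input, word_to_digit_map, digits_only=True):
--     num_str = ""
--     for i in range(len(input)):
--         ch = input[i]
--         if ch.isnumeric():
--             num_str += ch
--         elif digits_only == False:
--              substr = input[i:]
--
--              for k in word_to_digit_map.keys():
--                 if (substr.startswith(k)):
--                   num_str += word_to_digit_map[k]
--                   break
--     return num_str
-- ===== SOURCE B (Python) =====
-- def extract_all_numbers_from_string(input, word_to_digit_map, digits_only=True):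
--     # Collect hits per index: word occurrences first (in reverse map order, so
--     # earlier-map-order keys overwrite later ones), then literal digit characters
--     # (which always win).  Finally emit the hit values in index order.
--     hits = {}
--     if not digits_only:
--         for k, v in reversed(list(word_to_digit_map.items())):
--             start = input.find(k)
--             while 0 <= start < len(input):
--                 hits[start] = v
--                 start = input.find(k, start + 1)
--     for i, ch in enumerate(input):
--         if ch.isnumeric():
--             hits[i] = ch
--     return "".join(v for _, v in sorted(hits.items(), key=lambda p: p[0]))
-- ===== Notes on version B (the rewrite author's own statement) =====
-- stated objective: alternative
-- what changed: A scans every position, slicing input[i:] and prefix-testing all map keys at each non-digit position; B instead runs one str.find loop per map key collecting (index, digit) hits into a dict (reverse map order so earlier keys win, digits written last), then sorts the hit indices and joins the values.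
import Mathlib
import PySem

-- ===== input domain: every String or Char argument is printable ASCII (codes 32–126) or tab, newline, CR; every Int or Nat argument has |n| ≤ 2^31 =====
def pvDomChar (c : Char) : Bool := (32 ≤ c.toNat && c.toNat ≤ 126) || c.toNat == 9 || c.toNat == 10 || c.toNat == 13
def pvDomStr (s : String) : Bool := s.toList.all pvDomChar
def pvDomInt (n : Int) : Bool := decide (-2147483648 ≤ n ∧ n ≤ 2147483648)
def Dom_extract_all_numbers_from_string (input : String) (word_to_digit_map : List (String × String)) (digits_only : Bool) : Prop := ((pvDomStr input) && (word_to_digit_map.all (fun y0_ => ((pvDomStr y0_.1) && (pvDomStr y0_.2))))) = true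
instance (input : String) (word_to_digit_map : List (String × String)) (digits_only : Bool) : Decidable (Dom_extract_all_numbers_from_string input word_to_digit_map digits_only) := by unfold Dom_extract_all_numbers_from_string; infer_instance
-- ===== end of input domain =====

-- B replaces A's per-position scan (which slices input[i:] and prefix-tests every map key
-- at each non-digit position) by one str.find loop per key collecting hits into a dict,
-- sorted by index at the end (objective: alternative algorithm, same exact output).

-- ===== PORT A =====
-- dict lookup word_to_digit_map[k]; k always comes from the dict's own keys, so the default is never used
def pvALookup (m : List (String × String)) (k : String) : String :=
  (List.lookup k m).getD ""

-- inner 'for k in word_to_digit_map.keys(): if substr.startswith(k): num_str += word_to_digit_map[k]; break'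
def pvAInner (m : List (String × String)) (keys : List String) (substr : List Char) : List Char :=
  match keys with
  | [] => []
  | k :: rest =>
    if PySem.Chars.startswith substr k.toList then (pvALookup m k).toList
    else pvAInner m rest substr

-- ch.isnumeric() is ported as PySem.Chars.isdigit: exact on the ASCII domain Dom
def extract_all_numbers_from_string (input : String) (word_to_digit_map : List (String × String)) (digits_only : Bool) : String :=
  String.ofList <| (List.range input.toList.length).foldl (fun num_str i =>
    if PySem.Chars.isdigit (input.toList.getD i ' ') then num_str ++ [input.toList.getD i ' ']
    else if digits_only == false then
      num_str ++ pvAInner word_to_digit_map (word_to_digit_map.map (·.1)) (input.toList.drop i)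
    else num_str) []

-- ===== PORT B =====
-- 'start = input.find(k); while 0 <= start < len(input): hits[start] = v; start = input.find(k, start+1)'
-- (fuel only makes the loop total: each iteration moves start strictly right, so cs.length+1 suffices)
def pvBFindLoop (cs k : List Char) (v : String) (fuel : Nat) (start : Int)
    (hits : PySem.Dict Int String) : PySem.Dict Int String :=
  match fuel with
  | 0 => hits
  | f + 1 =>
    if 0 ≤ start ∧ start < (cs.length : Int) then
      pvBFindLoop cs k v f (PySem.Chars.findFrom cs k (start + 1)) (hits.insert start v)
    else hits

-- ch.isnumeric() ported as PySem.Chars.isdigit: exact on the ASCII domain Dom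
def extract_all_numbers_from_string_alt (input : String) (word_to_digit_map : List (String × String)) (digits_only : Bool) : String :=
  let cs := input.toList
  let hits0 : PySem.Dict Int String :=
    if digits_only then PySem.Dict.empty
    else word_to_digit_map.reverse.foldl
      (fun d p => pvBFindLoop cs p.1.toList p.2 (cs.length + 1) (PySem.Chars.find cs p.1.toList) d)
      PySem.Dict.empty
  let hits := (PySem.List.enumerate cs 0).foldl
    (fun d q => if PySem.Chars.isdigit q.2 then d.insert q.1 (String.ofList [q.2]) else d) hits0
  PySem.Str.join "" ((PySem.List.sorted hits.items (fun p => p.1) false).map (·.2))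

-- ===== PRECONDITION & SPEC =====
def Spec_extract_all_numbers_from_string (input : String) (word_to_digit_map : List (String × String)) (digits_only : Bool) (out : String) : Prop := out = extract_all_numbers_from_string_alt input word_to_digit_map digits_only
instance (input : String) (word_to_digit_map : List (String × String)) (digits_only : Bool) (out : String) : Decidable (Spec_extract_all_numbers_from_string input word_to_digit_map digits_only out) := by unfold Spec_extract_all_numbers_from_string; infer_instance

-- ===== CLAIM (what is proved, stated in full; the proofs are below) =====
def Claim_equal_extract_all_numbers_from_string : Prop := ∀ (input : String) (word_to_digit_map : List (String × String)) (digits_only : Bool), Dom_extract_all_numbers_from_string input word_to_digit_map digits_only → Spec_extract_all_numbers_from_string input word_to_digit_map digits_only (extract_all_numbers_from_string input word_to_digit_map digits_only)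

-- ===== LEMMAS AND PROOFS =====

-- the value A contributes at position j (and, as proved below, the value B's hits dict holds at key j)
def pvWordVal (cs : List Char) (m : List (String × String)) (j : Int) : Option String :=
  match m with
  | [] => none
  | p :: rest =>
    if 0 ≤ j ∧ j < (cs.length : Int) ∧ p.1.toList <+: cs.drop j.toNat then some p.2
    else pvWordVal cs rest j

def pvVal (cs : List Char) (m : List (String × String)) (digits_only : Bool) (j : Int) : Option String :=
  if 0 ≤ j ∧ j < (cs.length : Int) ∧ PySem.Chars.isdigit (cs.getD j.toNat ' ') then
    some (String.ofList [cs.getD j.toNat ' '])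
  else if digits_only then none
  else pvWordVal cs m j

def pvFirstKey (keys : List String) (substr : List Char) : Option String :=
  match keys with
  | [] => none
  | k :: rest => if PySem.Chars.startswith substr k.toList then some k else pvFirstKey rest substr

lemma pvAInner_eq (m : List (String × String)) (keys : List String) (substr : List Char) :
    pvAInner m keys substr =
      (match pvFirstKey keys substr with
       | some k => (pvALookup m k).toList
       | none => []) := by
  induction keys with
  | nil => rfl
  | cons k rest ih => simp only [pvAInner, pvFirstKey]; split <;> simp [ih]

lemma pvFirstKey_some {keys : List String} {substr : List Char} {k : String}
    (h : pvFirstKey keys substr = some k) :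
    PySem.Chars.startswith substr k.toList = true := by
  induction keys with
  | nil => simp [pvFirstKey] at h
  | cons k' rest ih =>
    simp only [pvFirstKey] at h
    split at h
    · cases h; assumption
    · exact ih h

lemma pvWordVal_some_bounds {cs : List Char} {m : List (String × String)} {j : Int} {w : String}
    (h : pvWordVal cs m j = some w) : 0 ≤ j ∧ j < (cs.length : Int) := by
  induction m with
  | nil => simp [pvWordVal] at h
  | cons p rest ih =>
    simp only [pvWordVal] at h
    split at h
    · rename_i hc; exact ⟨hc.1, hc.2.1⟩
    · exact ih h

-- A's inner loop computes pvWordVal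
lemma pvAInner_eq_wordVal (cs : List Char) (m : List (String × String)) (t : Nat) (ht : t < cs.length) :
    pvAInner m (m.map (·.1)) (cs.drop t) =
      (match pvWordVal cs m (t : Int) with
       | some w => w.toList
       | none => []) := by
  induction m with
  | nil => rfl
  | cons p rest ih =>
    obtain ⟨a, b⟩ := p
    by_cases hpre : a.toList <+: cs.drop t
    · have hsw : PySem.Chars.startswith (cs.drop t) a.toList = true :=
        (PySem.Chars.startswith_iff _ _).mpr hpre
      have hwv : pvWordVal cs ((a, b) :: rest) (t : Int) = some b := by
        simp only [pvWordVal]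
        rw [if_pos]
        exact ⟨by positivity, by exact_mod_cast ht, by simpa using hpre⟩
      rw [hwv]
      simp only [pvAInner, List.map_cons, hsw, if_true]
      simp [pvALookup, List.lookup]
    · have hsw : PySem.Chars.startswith (cs.drop t) a.toList = false := by
        rw [Bool.eq_false_iff]
        intro h
        exact hpre ((PySem.Chars.startswith_iff _ _).mp h)
      have hwv : pvWordVal cs ((a, b) :: rest) (t : Int) = pvWordVal cs rest (t : Int) := by
        simp only [pvWordVal]
        rw [if_neg]
        intro hc
        exact hpre (by simpa using hc.2.2)
      rw [hwv, ← ih]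
      simp only [pvAInner, List.map_cons, hsw, Bool.false_eq_true, if_false]
      rw [pvAInner_eq, pvAInner_eq]
      cases hfk : pvFirstKey (rest.map (·.1)) (cs.drop t) with
      | none => rfl
      | some k =>
        have hk : (k == a) = false := by
          rw [beq_eq_false_iff_ne]
          intro he
          have h2 := pvFirstKey_some hfk
          rw [he, hsw] at h2
          exact absurd h2 (by simp)
        simp [pvALookup, List.lookup, hk]

-- ===== the find loop fills in exactly the occurrences of k at or after base =====
lemma pvBFindLoop_spec (cs k : List Char) (v : String) :
    ∀ (fuel : Nat) (base : Nat) (hits : PySem.Dict Int String),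
      base ≤ cs.length → cs.length + 1 - base ≤ fuel → hits.keys.Nodup →
      (∀ j : Int,
        (pvBFindLoop cs k v fuel (PySem.Chars.findFrom cs k (base : Int)) hits).get? j =
          if (base : Int) ≤ j ∧ j < (cs.length : Int) ∧ k <+: cs.drop j.toNat then some v
          else hits.get? j)
      ∧ (pvBFindLoop cs k v fuel (PySem.Chars.findFrom cs k (base : Int)) hits).keys.Nodup := by
  intro fuel
  induction fuel with
  | zero => intro base hits hb hf _; omega
  | succ f ih =>
    intro base hits hb hf hnd
    by_cases hneg : PySem.Chars.findFrom cs k (base : Int) = -1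
    · have hno : ¬ k <:+: cs.drop base :=
        (PySem.Chars.findFrom_natCast_eq_neg_one_iff cs k base hb).mp hneg
      have hcond : ¬ (0 ≤ PySem.Chars.findFrom cs k (base : Int) ∧
          PySem.Chars.findFrom cs k (base : Int) < (cs.length : Int)) := by
        rw [hneg]; omega
      rw [pvBFindLoop, if_neg hcond]
      refine ⟨fun j => ?_, hnd⟩
      rw [if_neg]
      rintro ⟨hj1, hj2, hj3⟩
      apply hno
      have hdd : k <+: (cs.drop base).drop (j.toNat - base) := by
        rw [List.drop_drop]
        have he : base + (j.toNat - base) = j.toNat := by omega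
        rw [he]; exact hj3
      exact hdd.isInfix.trans (List.drop_suffix _ _).isInfix
    · set s := PySem.Chars.findFrom cs k (base : Int) with hs
      obtain ⟨hs1, hs2, hs3⟩ := PySem.Chars.findFrom_natCast_spec cs k base hb hneg
      have hs0 : 0 ≤ s := le_trans (by omega) hs1
      have hsn : s ≤ (cs.length : Int) := by
        rw [hs, PySem.Chars.findFrom_natCast cs k base hb]
        have := PySem.Chars.find_le_length (cs.drop base) k
        simp only [List.length_drop] at this
        split <;> omega
      by_cases hlt : s < (cs.length : Int)
      · -- loop body runs: insert at s, continue from s+1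
        have hcond : 0 ≤ s ∧ s < (cs.length : Int) := ⟨hs0, hlt⟩
        rw [pvBFindLoop, if_pos hcond]
        have hcast : s + 1 = ((s.toNat + 1 : Nat) : Int) := by omega
        have hb' : s.toNat + 1 ≤ cs.length := by omega
        have hf' : cs.length + 1 - (s.toNat + 1) ≤ f := by
          have : base ≤ s.toNat := by omega
          omega
        have hnd' := PySem.Dict.nodup_keys_insert hits s v hnd
        obtain ⟨ihg, ihn⟩ := ih (s.toNat + 1) (hits.insert s v) hb' hf' hnd'
        rw [hcast]
        refine ⟨fun j => ?_, ihn⟩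
        rw [ihg j, PySem.Dict.get?_insert]
        have hsv : ((s.toNat + 1 : Nat) : Int) = s + 1 := by omega
        rw [hsv]
        by_cases hj : (base : Int) ≤ j ∧ j < (cs.length : Int) ∧ k <+: cs.drop j.toNat
        · rw [if_pos hj]
          by_cases hjs : s + 1 ≤ j
          · rw [if_pos ⟨hjs, hj.2⟩]
          · -- base ≤ j ≤ s and occurrence at j: minimality forces j = s
            have hje : j = s := by
              by_contra hne
              have hjlt : j.toNat < s.toNat := by omega
              exact hs3 j.toNat (by omega) hjlt hj.2.2
            rw [if_neg (by omega), if_pos hje]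
        · rw [if_neg hj]
          have h1 : ¬ (s + 1 ≤ j ∧ j < (cs.length : Int) ∧ k <+: cs.drop j.toNat) := by
            intro hc; exact hj ⟨by omega, hc.2⟩
          rw [if_neg h1, if_neg]
          intro hje
          apply hj
          refine ⟨by omega, by omega, ?_⟩
          have : j.toNat = s.toNat := by omega
          rw [this]; exact hs2
      · -- s = cs.length (only for k = []): loop stops, and no occurrence ≥ base exists below length
        have hcond : ¬ (0 ≤ s ∧ s < (cs.length : Int)) := by omega
        rw [pvBFindLoop, if_neg hcond]
        refine ⟨fun j => ?_, hnd⟩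
        rw [if_neg]
        rintro ⟨hj1, hj2, hj3⟩
        exact hs3 j.toNat (by omega) (by omega) hj3

-- ===== the word pass (reverse-order overwrites) computes pvWordVal =====
lemma pvWordPass_spec (cs : List Char) (m : List (String × String)) :
    (∀ j : Int,
      (m.reverse.foldl
        (fun d p => pvBFindLoop cs p.1.toList p.2 (cs.length + 1) (PySem.Chars.find cs p.1.toList) d)
        PySem.Dict.empty).get? j = pvWordVal cs m j)
    ∧ (m.reverse.foldl
        (fun d p => pvBFindLoop cs p.1.toList p.2 (cs.length + 1) (PySem.Chars.find cs p.1.toList) d)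
        PySem.Dict.empty).keys.Nodup := by
  rw [List.foldl_reverse]
  induction m with
  | nil =>
    refine ⟨fun j => ?_, ?_⟩
    · simp [pvWordVal, PySem.Dict.get?_empty]
    · simp [PySem.Dict.keys, PySem.Dict.empty]
  | cons p rest ih =>
    simp only [List.foldr_cons]
    have hfind : PySem.Chars.find cs p.1.toList = PySem.Chars.findFrom cs p.1.toList ((0 : Nat) : Int) := by
      rw [Nat.cast_zero, PySem.Chars.findFrom_zero]
    rw [hfind]
    obtain ⟨hg, hn⟩ := pvBFindLoop_spec cs p.1.toList p.2 (cs.length + 1) 0 _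
      (Nat.zero_le _) (by omega) ih.2
    refine ⟨fun j => ?_, hn⟩
    rw [hg j, ih.1 j]
    simp only [pvWordVal, Nat.cast_zero]

-- ===== the digit pass overwrites hits at exactly the digit positions =====
lemma pvDigitPass_spec :
    ∀ (cs' : List Char) (s : Int) (d : PySem.Dict Int String), d.keys.Nodup →
      (∀ j : Int,
        ((PySem.List.enumerate cs' s).foldl
          (fun d q => if PySem.Chars.isdigit q.2 then d.insert q.1 (String.ofList [q.2]) else d) d).get? j =
          if s ≤ j ∧ j < s + cs'.length ∧ PySem.Chars.isdigit (cs'.getD (j - s).toNat ' ') then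
            some (String.ofList [cs'.getD (j - s).toNat ' '])
          else d.get? j)
      ∧ ((PySem.List.enumerate cs' s).foldl
          (fun d q => if PySem.Chars.isdigit q.2 then d.insert q.1 (String.ofList [q.2]) else d) d).keys.Nodup := by
  intro cs'
  induction cs' with
  | nil =>
    intro s d hnd
    refine ⟨fun j => ?_, by simpa [PySem.List.enumerate] using hnd⟩
    simp only [PySem.List.enumerate, List.foldl_nil, List.length_nil]
    rw [if_neg]; push_cast; omega
  | cons c cst ih =>
    intro s d hnd
    rw [PySem.List.enumerate_cons, List.foldl_cons]
    have hnd' : (if PySem.Chars.isdigit c then d.insert s (String.ofList [c]) else d).keys.Nodup := by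
      split
      · exact PySem.Dict.nodup_keys_insert d s _ hnd
      · exact hnd
    obtain ⟨hg, hn⟩ := ih (s + 1) _ hnd'
    refine ⟨fun j => ?_, hn⟩
    rw [hg j]
    have hd'get : (if PySem.Chars.isdigit c then d.insert s (String.ofList [c]) else d).get? j =
        if j = s ∧ PySem.Chars.isdigit c then some (String.ofList [c]) else d.get? j := by
      by_cases hc : PySem.Chars.isdigit c
      · simp only [hc, if_true, and_true]
        rw [PySem.Dict.get?_insert]
      · simp [hc]
    by_cases hjs : j = s
    · rw [if_neg (by rintro ⟨h1, -, -⟩; omega), hd'get]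
      have h0 : (j - s).toNat = 0 := by omega
      by_cases hc : PySem.Chars.isdigit c
      · rw [if_pos ⟨hjs, hc⟩, if_pos ⟨by omega,
          by simp only [List.length_cons]; push_cast; omega, by simpa [h0] using hc⟩]
        simp [h0]
      · rw [if_neg (by rintro ⟨-, h2⟩; exact hc h2),
          if_neg (by rintro ⟨-, -, h3⟩; exact hc (by simpa [h0] using h3))]
    · by_cases hge : s + 1 ≤ j
      · have htn : (j - s).toNat = (j - (s + 1)).toNat + 1 := by omega
        have hgetD : (c :: cst).getD (j - s).toNat ' ' = cst.getD (j - (s + 1)).toNat ' ' := by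
          rw [htn, List.getD_cons_succ]
        by_cases hcond : s + 1 ≤ j ∧ j < s + 1 + (cst.length : Int) ∧
            PySem.Chars.isdigit (cst.getD (j - (s + 1)).toNat ' ') = true
        · rw [if_pos hcond, if_pos ⟨by omega,
            by have := hcond.2.1; simp only [List.length_cons]; push_cast at this ⊢; omega,
            by rw [hgetD]; exact hcond.2.2⟩, hgetD]
        · rw [if_neg hcond, hd'get, if_neg (by rintro ⟨h1, -⟩; exact hjs h1), if_neg (by
            rintro ⟨-, h2, h3⟩
            exact hcond ⟨hge, by simp only [List.length_cons] at h2; push_cast at h2 ⊢; omega,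
              by rw [← hgetD]; exact h3⟩)]
      · rw [if_neg (by rintro ⟨h1, -, -⟩; omega), hd'get,
          if_neg (by rintro ⟨h1, -⟩; exact hjs h1), if_neg (by rintro ⟨h1, -, -⟩; omega)]

-- B's hits dictionary, named for the proofs
def pvHits (cs : List Char) (m : List (String × String)) (digits_only : Bool) : PySem.Dict Int String :=
  (PySem.List.enumerate cs 0).foldl
    (fun d q => if PySem.Chars.isdigit q.2 then d.insert q.1 (String.ofList [q.2]) else d)
    (if digits_only then PySem.Dict.empty
     else m.reverse.foldl
       (fun d p => pvBFindLoop cs p.1.toList p.2 (cs.length + 1) (PySem.Chars.find cs p.1.toList) d)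
       PySem.Dict.empty)

lemma pvAlt_eq (input : String) (m : List (String × String)) (digits_only : Bool) :
    extract_all_numbers_from_string_alt input m digits_only =
      PySem.Str.join ""
        ((PySem.List.sorted (pvHits input.toList m digits_only).items (fun p => p.1) false).map (·.2)) := rfl

lemma pvHits0_spec (cs : List Char) (m : List (String × String)) (digits_only : Bool) :
    (∀ j : Int, (if digits_only then PySem.Dict.empty
      else m.reverse.foldl
        (fun d p => pvBFindLoop cs p.1.toList p.2 (cs.length + 1) (PySem.Chars.find cs p.1.toList) d)
        PySem.Dict.empty : PySem.Dict Int String).get? j =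
        if digits_only then none else pvWordVal cs m j)
    ∧ (if digits_only then PySem.Dict.empty
      else m.reverse.foldl
        (fun d p => pvBFindLoop cs p.1.toList p.2 (cs.length + 1) (PySem.Chars.find cs p.1.toList) d)
        PySem.Dict.empty : PySem.Dict Int String).keys.Nodup := by
  by_cases hdo : digits_only
  · simp only [hdo, if_true]
    exact ⟨fun j => by simp [PySem.Dict.get?_empty], by simp [PySem.Dict.keys, PySem.Dict.empty]⟩
  · simp only [hdo]
    exact pvWordPass_spec cs m

lemma pvHits_get? (cs : List Char) (m : List (String × String)) (digits_only : Bool) (j : Int) :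
    (pvHits cs m digits_only).get? j = pvVal cs m digits_only j := by
  obtain ⟨h0g, h0n⟩ := pvHits0_spec cs m digits_only
  obtain ⟨hg, _⟩ := pvDigitPass_spec cs 0 _ h0n
  rw [pvHits, hg j, h0g j]
  simp only [pvVal, zero_add, sub_zero]

lemma pvHits_nodup (cs : List Char) (m : List (String × String)) (digits_only : Bool) :
    (pvHits cs m digits_only).keys.Nodup := by
  obtain ⟨_, h0n⟩ := pvHits0_spec cs m digits_only
  exact (pvDigitPass_spec cs 0 _ h0n).2

lemma pvVal_some_bounds {cs : List Char} {m : List (String × String)} {digits_only : Bool}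
    {j : Int} {w : String} (h : pvVal cs m digits_only j = some w) :
    0 ≤ j ∧ j < (cs.length : Int) := by
  rw [pvVal] at h
  split at h
  · rename_i hc; exact ⟨hc.1, hc.2.1⟩
  · split at h
    · exact absurd h (by simp)
    · exact pvWordVal_some_bounds h

-- the hits, listed in index order
def pvYs (cs : List Char) (m : List (String × String)) (digits_only : Bool) : List (Int × String) :=
  (List.range cs.length).filterMap
    (fun (t : Nat) => (pvVal cs m digits_only (t : Int)).map (fun w => ((t : Int), w)))

lemma mem_pvYs (cs : List Char) (m : List (String × String)) (digits_only : Bool)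
    (p : Int × String) : p ∈ pvYs cs m digits_only ↔ pvVal cs m digits_only p.1 = some p.2 := by
  simp only [pvYs, List.mem_filterMap, List.mem_range]
  constructor
  · rintro ⟨t, ht, hmap⟩
    cases hv : pvVal cs m digits_only (t : Int) with
    | none => rw [hv] at hmap; simp at hmap
    | some w =>
      rw [hv] at hmap
      simp only [Option.map_some, Option.some_inj] at hmap
      rw [← hmap]
      exact hv
  · intro h
    have hb := pvVal_some_bounds h
    have hc : ((p.1.toNat : Nat) : Int) = p.1 := by omega
    have hlt : p.1.toNat < cs.length := by omega
    exact ⟨p.1.toNat, hlt, by rw [hc, h]; simp⟩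

lemma pairwise_pvYs (cs : List Char) (m : List (String × String)) (digits_only : Bool) :
    (pvYs cs m digits_only).Pairwise (fun a b => a.1 < b.1) := by
  unfold pvYs
  refine List.Pairwise.filterMap
    (fun t : Nat => (pvVal cs m digits_only (t : Int)).map (fun w => ((t : Int), w)))
    ?_ List.pairwise_lt_range
  intro a a' hlt b hb b' hb'
  beta_reduce at hb hb'
  have h1 : b.1 = (a : Int) := by
    cases hv : pvVal cs m digits_only (a : Int) <;> rw [hv] at hb <;> simp at hb
    rw [← hb]
  have h2 : b'.1 = (a' : Int) := by
    cases hv : pvVal cs m digits_only (a' : Int) <;> rw [hv] at hb' <;> simp at hb'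
    rw [← hb']
  rw [h1, h2]
  exact_mod_cast hlt

lemma pvYs_nodup (cs : List Char) (m : List (String × String)) (digits_only : Bool) :
    (pvYs cs m digits_only).Nodup :=
  (pairwise_pvYs cs m digits_only).imp (fun h => by intro he; rw [he] at h; exact lt_irrefl _ h)

lemma sorted_items_eq (cs : List Char) (m : List (String × String)) (digits_only : Bool) :
    PySem.List.sorted (pvHits cs m digits_only).items (fun p => p.1) false = pvYs cs m digits_only := by
  apply PySem.List.sorted_eq_of_perm_of_pairwise_lt
  · have hitems : (pvHits cs m digits_only).items.Nodup := by
      have := pvHits_nodup cs m digits_only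
      simp only [PySem.Dict.keys] at this
      exact List.Nodup.of_map _ this
    rw [List.perm_ext_iff_of_nodup (pvYs_nodup cs m digits_only) hitems]
    intro p
    rw [mem_pvYs, ← PySem.Dict.get?_eq_some_iff_mem_items _ _ _ (pvHits_nodup cs m digits_only),
      pvHits_get?]
  · exact pairwise_pvYs cs m digits_only

-- ===== A as a flatMap over positions =====
def pvGA (cs : List Char) (m : List (String × String)) (digits_only : Bool) (i : Nat) : List Char :=
  if PySem.Chars.isdigit (cs.getD i ' ') then [cs.getD i ' ']
  else if digits_only == false then pvAInner m (m.map (·.1)) (cs.drop i)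
  else []

lemma pvA_eq (input : String) (m : List (String × String)) (digits_only : Bool) :
    extract_all_numbers_from_string input m digits_only =
      String.ofList ((List.range input.toList.length).flatMap (pvGA input.toList m digits_only)) := by
  unfold extract_all_numbers_from_string
  congr 1
  rw [PySem.List.foldl_congr_mem _ _
    (fun acc i => acc ++ pvGA input.toList m digits_only i) _ ?_]
  · rw [PySem.List.foldl_append_eq_flatMap]
    simp
  · intro acc i _
    simp only [pvGA]
    split_ifs <;> simp

lemma pvGA_eq_val (cs : List Char) (m : List (String × String)) (digits_only : Bool)
    (t : Nat) (ht : t < cs.length) :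
    pvGA cs m digits_only t = ((pvVal cs m digits_only (t : Int)).map String.toList).getD [] := by
  have htn : ((t : Int)).toNat = t := by omega
  by_cases hd : PySem.Chars.isdigit (cs.getD t ' ')
  · rw [pvGA, if_pos hd, pvVal,
      if_pos ⟨by positivity, by exact_mod_cast ht, by rw [htn]; exact hd⟩]
    simp [htn]
  · have hv : pvVal cs m digits_only (t : Int) =
        if digits_only then none else pvWordVal cs m (t : Int) := by
      rw [pvVal, if_neg (by rw [htn]; rintro ⟨-, -, hc⟩; exact hd hc)]
    rw [pvGA, if_neg hd, hv]
    cases digits_only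
    · rw [if_pos (show ((false == false) = true) by decide),
        if_neg (show ¬ ((false : Bool) = true) by decide)]
      rw [pvAInner_eq_wordVal cs m t ht]
      cases pvWordVal cs m (t : Int) <;> simp
    · rw [if_neg (show ¬ ((true == false) = true) by decide),
        if_pos (show ((true : Bool) = true) from rfl)]
      simp

lemma flatten_map_filterMap {α β γ : Type} (f : α → Option β) (g : β → List γ) (l : List α) :
    ((l.filterMap f).map g).flatten = l.flatMap (fun x => ((f x).map g).getD []) := by
  induction l with
  | nil => rfl
  | cons x t ih => cases h : f x <;> simp [h, ih]

lemma intercalate_nil_flatten (parts : List (List Char)) :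
    List.intercalate [] parts = parts.flatten := by
  induction parts with
  | nil => simp [List.intercalate]
  | cons p t ih =>
    cases t with
    | nil => simp [List.intercalate]
    | cons q u => simp_all [List.intercalate, List.intersperse]

-- ===== VERDICT (by name: the statement is the Claim_ definition above) =====
theorem extract_all_numbers_from_string_spec : Claim_equal_extract_all_numbers_from_string := by
  intro input m digits_only _
  unfold Spec_extract_all_numbers_from_string
  rw [pvA_eq, pvAlt_eq, sorted_items_eq]
  have hmap : (pvYs input.toList m digits_only).map (·.2) =
      (List.range input.toList.length).filterMap
        (fun (t : Nat) => pvVal input.toList m digits_only (t : Int)) := by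
    simp [pvYs, List.map_filterMap, Option.map_map]
  rw [hmap]
  rw [← String.toList_inj]
  simp only [PySem.Str.join, PySem.Chars.join]
  simp only [String.toList_ofList]
  rw [show ("".toList) = ([] : List Char) from rfl, intercalate_nil_flatten, flatten_map_filterMap]
  rw [List.flatMap_def, List.flatMap_def]
  exact congrArg List.flatten (List.map_congr_left (fun t ht =>
    pvGA_eq_val input.toList m digits_only t (List.mem_range.mp ht)))
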